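-- pv_equiv track=rewrite | github.com/ivan-kud/ml-projects | ml-service/app/src/suggestion.py | get_number_of_contexts
-- ===== SOURCE A (Python) =====
-- def get_number_of_contexts(token_number: int) -> int:
--     # Compute number of contexts
--     number_of_contexts = 0
--     for i in range(token_number):
--         for j in range(i, i + 8):
--             if j >= token_number:
--                 continue
--             number_of_contexts += 1
--
--     return number_of_contexts
-- ===== SOURCE B (Python) =====
-- def get_number_of_contexts(token_number: int) -> int:
--     # Closed form: each token i contributes min(8, token_number - i) contexts.
--     if token_number < 8:
--         return token_number * (token_number + 1) // 2 if token_number > 0 else 0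
--     return 8 * token_number - 28
-- ===== Notes on version B (the rewrite author's own statement) =====
-- stated objective: faster
-- what changed: Replaced the nested counting loops by a closed-form formula: 8*n-28 for n>=8, n*(n+1)//2 for 0<n<8, 0 otherwise.
import Mathlib
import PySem

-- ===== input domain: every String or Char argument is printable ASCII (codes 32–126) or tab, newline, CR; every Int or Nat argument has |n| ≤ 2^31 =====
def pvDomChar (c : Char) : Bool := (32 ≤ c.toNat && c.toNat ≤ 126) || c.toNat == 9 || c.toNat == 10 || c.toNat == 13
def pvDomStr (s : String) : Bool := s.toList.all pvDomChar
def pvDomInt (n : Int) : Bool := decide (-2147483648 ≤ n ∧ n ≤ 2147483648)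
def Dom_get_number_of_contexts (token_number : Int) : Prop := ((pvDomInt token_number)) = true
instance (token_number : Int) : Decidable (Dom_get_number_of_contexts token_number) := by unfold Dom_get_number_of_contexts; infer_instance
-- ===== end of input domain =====

-- B replaces A's nested counting loops by an O(1) closed-form formula (objective: faster).

-- ===== PORT A =====
def get_number_of_contexts (token_number : Int) : Int :=
  (PySem.List.pyRange 0 token_number 1).foldl (fun acc i =>
    (PySem.List.pyRange i (i + 8) 1).foldl (fun acc2 j =>
      if j ≥ token_number then acc2 else acc2 + 1) acc) 0

-- ===== PORT B =====
def get_number_of_contexts_alt (token_number : Int) : Int :=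
  if token_number < 8 then
    (if token_number > 0 then PySem.Int.floordiv (token_number * (token_number + 1)) 2 else 0)
  else 8 * token_number - 28

-- ===== PRECONDITION & SPEC =====
def Spec_get_number_of_contexts (token_number : Int) (out : Int) : Prop := out = get_number_of_contexts_alt token_number
instance (token_number : Int) (out : Int) : Decidable (Spec_get_number_of_contexts token_number out) := by unfold Spec_get_number_of_contexts; infer_instance

-- ===== CLAIM (what is proved, stated in full; the proofs are below) =====
def Claim_equal_get_number_of_contexts : Prop := ∀ (token_number : Int), Dom_get_number_of_contexts token_number → Spec_get_number_of_contexts token_number (get_number_of_contexts token_number)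

-- ===== LEMMAS AND PROOFS =====

-- running total of A's outer loop after m iterations (threshold n fixed)
def pvT (n : Int) : Nat → Int
  | 0 => 0
  | m + 1 => pvT n m + min 8 (max 0 (n - m))

set_option maxHeartbeats 1000000 in
-- the inner loop adds min(8, max(0, n - i)) to the accumulator
theorem pv_inner (n i acc : Int) :
    (PySem.List.pyRange i (i + 8) 1).foldl (fun acc2 j =>
      if j ≥ n then acc2 else acc2 + 1) acc = acc + min 8 (max 0 (n - i)) := by
  have h : PySem.List.pyRange i (i + 8) 1 = [i, i+1, i+2, i+3, i+4, i+5, i+6, i+7] := by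
    rw [PySem.List.pyRange_one_cons (by omega), PySem.List.pyRange_one_cons (by omega),
        PySem.List.pyRange_one_cons (by omega), PySem.List.pyRange_one_cons (by omega),
        PySem.List.pyRange_one_cons (by omega), PySem.List.pyRange_one_cons (by omega),
        PySem.List.pyRange_one_cons (by omega), PySem.List.pyRange_one_cons (by omega),
        PySem.List.pyRange_one_eq_nil (by omega)]
    norm_num
    omega
  rw [h]
  simp only [List.foldl, ge_iff_le]
  split_ifs <;> omega

-- A's outer loop over range(0, m) computes acc + pvT n m
theorem pv_outer (n : Int) (m : Nat) (acc : Int) :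
    (PySem.List.pyRange 0 (m : Int) 1).foldl (fun acc i =>
      (PySem.List.pyRange i (i + 8) 1).foldl (fun acc2 j =>
        if j ≥ n then acc2 else acc2 + 1) acc) acc = acc + pvT n m := by
  induction m generalizing acc with
  | zero => simp [PySem.List.pyRange_one_eq_nil, pvT]
  | succ m ih =>
      rw [show ((m + 1 : Nat) : Int) = (m : Int) + 1 by push_cast; ring,
          PySem.List.pyRange_one_succ_right (by positivity), List.foldl_append, ih]
      simp only [List.foldl, pvT, pv_inner]
      omega

-- closed form of twice the running total, for m ≤ n
theorem pv_closed (n : Int) (m : Nat) (hm : (m : Int) ≤ n) :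
    2 * pvT n m =
      if (8 : Int) ≤ n - m then 16 * (m : Int)
      else if n < 8 then n * (n + 1) - (n - m) * (n - m + 1)
      else 16 * n - 56 - (n - m) * (n - m + 1) := by
  induction m with
  | zero =>
      simp only [pvT, Nat.cast_zero, sub_zero]
      split_ifs <;> first | (ring_nf; omega) | ring_nf | omega
  | succ m ih =>
      have hm' : (m : Int) ≤ n := by push_cast at hm ⊢; omega
      have ih' := ih hm'
      simp only [pvT]
      push_cast at hm ⊢
      by_cases h8 : (8 : Int) ≤ n - m
      · rw [if_pos h8] at ih'
        rw [show min 8 (max 0 (n - (m : Int))) = 8 from by omega]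
        by_cases h1 : (8 : Int) ≤ n - ((m : Int) + 1)
        · rw [if_pos h1]; omega
        · rw [if_neg h1, if_neg (show ¬ n < 8 by omega),
              show n - ((m : Int) + 1) = 7 from by omega]
          norm_num; omega
      · rw [if_neg h8] at ih'
        rw [show min 8 (max 0 (n - (m : Int))) = n - m from by omega,
            if_neg (show ¬ (8 : Int) ≤ n - ((m : Int) + 1) from by omega),
            show n - ((m : Int) + 1) = (n - m) - 1 from by ring]
        split_ifs at ih' ⊢ <;> linear_combination ih'

-- ===== VERDICT (by name: the statement is the Claim_ definition above) =====
theorem get_number_of_contexts_spec : Claim_equal_get_number_of_contexts := by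
  intro n _
  unfold Spec_get_number_of_contexts get_number_of_contexts get_number_of_contexts_alt
  by_cases hpos : n ≤ 0
  · rw [PySem.List.pyRange_one_eq_nil hpos]
    simp only [List.foldl]
    rw [if_pos (by omega), if_neg (by omega)]
  · obtain ⟨m, rfl⟩ : ∃ m : Nat, n = (m : Int) := ⟨n.toNat, by omega⟩
    rw [pv_outer (m : Int) m 0]
    have hcl := pv_closed (m : Int) m le_rfl
    rw [if_neg (show ¬ (8 : Int) ≤ (m : Int) - (m : Int) from by omega),
        show (m : Int) - (m : Int) = 0 from by ring] at hcl
    norm_num at hcl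
    by_cases h8 : m < 8
    · rw [if_pos h8] at hcl
      rw [if_pos (show ((m : Int)) < 8 from by exact_mod_cast h8),
          if_pos (show ((m : Int)) > 0 from by omega),
          PySem.Int.floordiv_eq_ediv_of_pos (by omega)]
      generalize hk : (m : Int) * ((m : Int) + 1) = k at hcl ⊢
      omega
    · rw [if_neg h8] at hcl
      rw [if_neg (show ¬ ((m : Int)) < 8 from by exact_mod_cast h8)]
      omega
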